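-- pv_equiv track=rewrite | github.com/eunbin-hyun/AlgorithmTest_practice | 프로그래머스/0/181881. 조건에 맞게 수열 변환하기 2/조건에 맞게 수열 변환하기 2.py | solution
-- ===== SOURCE A (Python) =====
-- def solution(arr):
--     answer = 0
--     x = 0
--
--     while True:
--         change = []
--         for i in range(len(arr)):
--             if arr[i]>=50 and arr[i]%2==0:
--                 change.append(int(arr[i]/2))
--             elif arr[i]<50 and arr[i]%2==1:
--                 change.append(int(arr[i]*2 +1))
--             else:
--                 change.append(arr[i])
--
--         if change == arr:
--             return x
--
--         x = x + 1
--         arr = change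
-- ===== SOURCE B (Python) =====
-- def solution(arr):
--     # Per-element recursive convergence count + max reduction;
--     # step branches on v < 50 first, then parity (v >> 1 == v // 2 for even nonneg case handled exactly).
--     def step(v):
--         if v < 50:
--             return v * 2 + 1 if v % 2 != 0 else v
--         return v // 2 if v % 2 == 0 else v
--
--     def steps(v):
--         w = step(v)
--         return 0 if w == v else 1 + steps(w)
--
--     return max(map(steps, arr), default=0)
-- ===== Notes on version B (the rewrite author's own statement) =====
-- stated objective: alternative
-- what changed: Replaces A's repeated whole-array rebuild-and-compare loop by an independent recursive per-element convergence count (step branching first on v<50, then parity) combined with a max reduction over the elements.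
import Mathlib
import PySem

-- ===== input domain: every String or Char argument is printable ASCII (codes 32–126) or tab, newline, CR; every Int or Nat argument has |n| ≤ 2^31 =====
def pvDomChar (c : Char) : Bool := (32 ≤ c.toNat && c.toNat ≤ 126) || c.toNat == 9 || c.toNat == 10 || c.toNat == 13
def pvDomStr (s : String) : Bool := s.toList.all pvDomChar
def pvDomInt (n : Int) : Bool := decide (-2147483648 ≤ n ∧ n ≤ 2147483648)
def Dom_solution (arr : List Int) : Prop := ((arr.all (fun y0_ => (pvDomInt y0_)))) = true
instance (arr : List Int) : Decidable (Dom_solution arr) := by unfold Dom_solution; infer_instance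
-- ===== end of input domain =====

-- B replaces A's repeated whole-array rebuild-and-compare loop by an independent recursive
-- per-element convergence count plus a max reduction (objective: alternative decomposition).

-- ===== PORT A =====
-- Per-element transform of A's inner for-loop body (branches in A's order).
-- `int(arr[i]/2)` is ported as `a / 2`: the guard ensures a is even and 50 ≤ a ≤ 2^31,
-- where Python's float division is exact and truncation agrees with Lean's `/`.
def solutionStepA (a : Int) : Int :=
  if a ≥ 50 ∧ a % 2 = 0 then a / 2
  else if a < 50 ∧ a % 2 = 1 then a * 2 + 1
  else a

-- A's `while True` loop; the fuel 64 only makes the recursion total: on every input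
-- admitted by Pre_solution the loop exits well before the fuel runs out (proved below).
def solutionLoopA (fuel : Nat) (arr : List Int) (x : Int) : Int :=
  match fuel with
  | 0 => x
  | fuel + 1 =>
    let change := arr.map solutionStepA
    if change = arr then x
    else solutionLoopA fuel change (x + 1)

def solution (arr : List Int) : Int := solutionLoopA 64 arr 0

-- ===== PORT B =====
-- Source B's `step`: branches first on v < 50, then on parity (Python `//` = floordiv).
def altStep (v : Int) : Int :=
  if v < 50 then (if v % 2 ≠ 0 then v * 2 + 1 else v)
  else (if v % 2 = 0 then PySem.Int.floordiv v 2 else v)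

-- Source B's recursive `steps`; the counter is a nonnegative step count, kept as Nat;
-- the fuel 64 only makes the recursion total (B never hits it on admitted inputs).
def altSteps : Nat → Int → Nat
  | 0, _ => 0
  | fuel + 1, v =>
    let w := altStep v
    if w = v then 0 else 1 + altSteps fuel w

-- `max(map(steps, arr), default=0)`
def solution_alt (arr : List Int) : Int :=
  (((arr.map (altSteps 64)).foldr max 0 : Nat) : Int)

-- ===== PRECONDITION & SPEC =====
-- Pre_ excludes exactly the inputs on which A never returns: an element that is odd and
-- below -1 is doubled forever (x ↦ 2x+1 stays odd and < -1), so A's loop diverges there.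
def Pre_solution (arr : List Int) : Prop := ∀ a ∈ arr, a % 2 = 1 → -1 ≤ a
instance (arr : List Int) : Decidable (Pre_solution arr) := by unfold Pre_solution; infer_instance

def pvWitness_solution : List Int := [1, 100, 50, -4, 49]

def Spec_solution (arr : List Int) (out : Int) : Prop := out = solution_alt arr
instance (arr : List Int) (out : Int) : Decidable (Spec_solution arr out) := by unfold Spec_solution; infer_instance

-- ===== CLAIM (what is proved, stated in full; the proofs are below) =====
def Claim_equal_solution : Prop := ∀ (arr : List Int), Dom_solution arr → Pre_solution arr → Spec_solution arr (solution arr)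

-- ===== LEMMAS AND PROOFS =====

-- `step^[n] a` is a fixed point of the transform
def Pfix (a : Int) (n : Nat) : Prop := solutionStepA (solutionStepA^[n] a) = solutionStepA^[n] a

-- convergence within 31 steps
def Conv (a : Int) : Prop := ∃ n, n ≤ 31 ∧ Pfix a n

-- Nat-valued step count with fuel (reference object for both ports)
def Cn (fuel : Nat) (a : Int) : Nat :=
  match fuel with
  | 0 => 0
  | fuel + 1 => if solutionStepA a = a then 0 else Cn fuel (solutionStepA a) + 1

def Ncount (a : Int) : Nat := Cn 64 a

theorem stepEq (v : Int) : altStep v = solutionStepA v := by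
  unfold altStep solutionStepA
  have hm := Int.emod_two_eq_zero_or_one v
  by_cases h50 : v < 50
  · by_cases hodd : v % 2 = 0
    · simp [h50, hodd, show ¬(v ≥ 50 ∧ v % 2 = 0) by omega]
    · simp [h50, hodd, show ¬(v ≥ 50 ∧ v % 2 = 0) by omega,
            show v < 50 ∧ v % 2 = 1 by omega]
  · by_cases hodd : v % 2 = 0
    · rw [if_neg h50, if_pos hodd, if_pos (show v ≥ 50 ∧ v % 2 = 0 by omega),
          PySem.Int.floordiv_eq_ediv_of_pos (by omega)]
    · simp [h50, hodd, show ¬(v ≥ 50 ∧ v % 2 = 0) by omega]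

theorem stepA_fixed {a : Int} (h1 : ¬(a ≥ 50 ∧ a % 2 = 0)) (h2 : ¬(a < 50 ∧ a % 2 = 1)) :
    solutionStepA a = a := by
  unfold solutionStepA
  rw [if_neg h1, if_neg h2]

theorem Pfix_shift {a : Int} {n : Nat} (h : Pfix a (n + 1)) : Pfix (solutionStepA a) n := by
  unfold Pfix at *
  rwa [Function.iterate_succ_apply] at h

theorem Pfix_shift' {a : Int} {n : Nat} (h : Pfix (solutionStepA a) n) : Pfix a (n + 1) := by
  unfold Pfix at *
  rwa [Function.iterate_succ_apply]

theorem Conv_step {a : Int} (h : Conv a) : Conv (solutionStepA a) := by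
  obtain ⟨n, hn, hp⟩ := h
  match n, hp with
  | 0, hp => exact ⟨0, by omega, by unfold Pfix at *; simp at hp ⊢; rw [hp]; exact hp⟩
  | n + 1, hp => exact ⟨n, by omega, Pfix_shift hp⟩

theorem Cn_le {n : Nat} : ∀ (f : Nat) (a : Int), Pfix a n → Cn f a ≤ n := by
  intro f
  induction f generalizing n with
  | zero => intro a _; exact Nat.zero_le n
  | succ f ih =>
    intro a hp
    unfold Cn
    by_cases hfix : solutionStepA a = a
    · simp [hfix]
    · simp only [hfix, if_neg, if_false]
      match n, hp with
      | 0, hp => exact absurd hp hfix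
      | n + 1, hp => have := ih (solutionStepA a) (Pfix_shift hp); omega

theorem Cn_insens {n : Nat} : ∀ (a : Int), Pfix a n → ∀ f, n ≤ f → Cn f a = Cn n a := by
  induction n with
  | zero =>
    intro a hp f _
    have hfix : solutionStepA a = a := hp
    cases f with
    | zero => rfl
    | succ f => simp [Cn, hfix]
  | succ n ih =>
    intro a hp f hf
    by_cases hfix : solutionStepA a = a
    · cases f with
      | zero => simp [Cn, hfix]
      | succ f => simp [Cn, hfix]
    · match f, hf with
      | f + 1, hf =>
        have h1 : Cn (f + 1) a = Cn f (solutionStepA a) + 1 := by simp [Cn, hfix]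
        have h2 : Cn (n + 1) a = Cn n (solutionStepA a) + 1 := by simp [Cn, hfix]
        rw [h1, h2, ih (solutionStepA a) (Pfix_shift hp) f (by omega)]

theorem Ncount_fix {a : Int} (h : solutionStepA a = a) : Ncount a = 0 := by
  simp [Ncount, Cn, h]

theorem Ncount_pos {a : Int} (h : solutionStepA a ≠ a) : 1 ≤ Ncount a := by
  simp [Ncount, Cn, h]

theorem Ncount_succ {a : Int} (hc : Conv a) (h : solutionStepA a ≠ a) :
    Ncount a = Ncount (solutionStepA a) + 1 := by
  obtain ⟨n, hn, hp⟩ := Conv_step hc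
  have h1 : Ncount a = Cn 63 (solutionStepA a) + 1 := by simp [Ncount, Cn, h]
  rw [h1, Cn_insens (solutionStepA a) hp 63 (by omega),
      ← Cn_insens (solutionStepA a) hp 64 (by omega)]
  rfl

theorem Ncount_le {a : Int} {n : Nat} (hp : Pfix a n) : Ncount a ≤ n := Cn_le 64 a hp

-- B's recursive counter computes the reference count (unconditionally)
theorem altSteps_eq_Cn : ∀ (f : Nat) (v : Int), altSteps f v = Cn f v := by
  intro f
  induction f with
  | zero => intro v; rfl
  | succ f ih =>
    intro v
    simp only [altSteps, Cn, stepEq]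
    by_cases h : solutionStepA v = v
    · simp [h]
    · simp only [h, if_neg, if_false, ih]; omega

-- left fold of max over mapped counts = the right fold B uses
theorem foldl_max_eq_foldr (g : Int → Nat) : ∀ (l : List Int) (m : Nat),
    l.foldl (fun m a => max m (g a)) m = max m ((l.map g).foldr max 0) := by
  intro l
  induction l with
  | nil => intro m; simp
  | cons a l ih =>
    intro m
    simp only [List.foldl_cons, List.map_cons, List.foldr_cons, ih (max m (g a))]
    omega

theorem foldl_max_ge_init (g : Int → Nat) : ∀ (l : List Int) (m : Nat),
    m ≤ l.foldl (fun m a => max m (g a)) m := by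
  intro l
  induction l with
  | nil => intro m; exact Nat.le_refl m
  | cons a l ih =>
    intro m
    exact le_trans (le_max_left m (g a)) (ih (max m (g a)))

theorem foldl_max_ge_mem (g : Int → Nat) : ∀ (l : List Int) (m : Nat) (a : Int), a ∈ l →
    g a ≤ l.foldl (fun m b => max m (g b)) m := by
  intro l
  induction l with
  | nil => intro m a ha; simp at ha
  | cons b l ih =>
    intro m a ha
    rcases List.mem_cons.mp ha with h | h
    · subst h; exact le_trans (le_max_right m (g a)) (foldl_max_ge_init g l _)
    · exact ih _ a h

theorem foldl_max_zero (g : Int → Nat) : ∀ (l : List Int), (∀ a ∈ l, g a = 0) →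
    l.foldl (fun m a => max m (g a)) 0 = 0 := by
  intro l
  induction l with
  | nil => intro _; rfl
  | cons a l ih =>
    intro h
    have ha := h a (List.mem_cons_self)
    simp only [List.foldl_cons, ha, Nat.max_zero]
    exact ih (fun b hb => h b (List.mem_cons_of_mem a hb))

theorem foldl_max_sub_one : ∀ (l : List Int) (m : Nat), (∀ a ∈ l, Ncount (solutionStepA a) = Ncount a - 1) →
    l.foldl (fun m a => max m (Ncount (solutionStepA a))) (m - 1)
      = (l.foldl (fun m a => max m (Ncount a)) m) - 1 := by
  intro l
  induction l with
  | nil => intro m _; rfl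
  | cons a l ih =>
    intro m h
    simp only [List.foldl_cons]
    rw [h a (List.mem_cons_self)]
    have : max (m - 1) (Ncount a - 1) = max m (Ncount a) - 1 := by omega
    rw [this]
    exact ih _ (fun b hb => h b (List.mem_cons_of_mem a hb))

theorem map_eq_self_iff (f : Int → Int) : ∀ (l : List Int), l.map f = l ↔ ∀ a ∈ l, f a = a := by
  intro l
  induction l with
  | nil => simp
  | cons a l ih => simp [ih]

-- A's loop returns x + (max of the per-element counts) whenever every element converges
theorem loopA_eq : ∀ (fuel : Nat) (arr : List Int) (x : Int),
    (∀ a ∈ arr, Conv a ∧ Ncount a < fuel) →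
    solutionLoopA fuel arr x = x + ((arr.foldl (fun m a => max m (Ncount a)) 0 : Nat) : Int) := by
  intro fuel
  induction fuel with
  | zero =>
    intro arr x h
    cases arr with
    | nil => simp [solutionLoopA]
    | cons a l => exact absurd (h a List.mem_cons_self).2 (Nat.not_lt_zero _)
  | succ fuel ih =>
    intro arr x h
    unfold solutionLoopA
    by_cases heq : arr.map solutionStepA = arr
    · simp only [heq, if_pos]
      have hz : ∀ a ∈ arr, Ncount a = 0 := fun a ha =>
        Ncount_fix ((map_eq_self_iff solutionStepA arr).mp heq a ha)
      rw [foldl_max_zero Ncount arr hz]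
      simp
    · simp only [heq, if_neg, if_false]
      obtain ⟨a0, ha0, hne0⟩ : ∃ a ∈ arr, solutionStepA a ≠ a := by
        by_contra hall
        push_neg at hall
        exact heq ((map_eq_self_iff solutionStepA arr).mpr hall)
      have hfuel1 : 1 ≤ fuel := by
        have := Ncount_pos hne0
        have := (h a0 ha0).2
        omega
      have hmap : ∀ b ∈ arr.map solutionStepA, Conv b ∧ Ncount b < fuel := by
        intro b hb
        obtain ⟨a, ha, rfl⟩ := List.mem_map.mp hb
        refine ⟨Conv_step (h a ha).1, ?_⟩
        by_cases hfix : solutionStepA a = a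
        · rw [hfix, Ncount_fix hfix]; omega
        · have := Ncount_succ (h a ha).1 hfix
          have := (h a ha).2
          omega
      rw [ih (arr.map solutionStepA) (x + 1) hmap]
      have hsub : ∀ a ∈ arr, Ncount (solutionStepA a) = Ncount a - 1 := by
        intro a ha
        by_cases hfix : solutionStepA a = a
        · rw [hfix, Ncount_fix hfix]
        · have := Ncount_succ (h a ha).1 hfix; omega
      have hfold : (arr.map solutionStepA).foldl (fun m a => max m (Ncount a)) 0
          = (arr.foldl (fun m a => max m (Ncount a)) 0) - 1 := by
        rw [List.foldl_map]
        have h0 : (0 : Nat) = 0 - 1 := rfl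
        rw [h0, foldl_max_sub_one arr 0 hsub]
      rw [hfold]
      have hge : 1 ≤ arr.foldl (fun m a => max m (Ncount a)) 0 :=
        le_trans (Ncount_pos hne0) (foldl_max_ge_mem Ncount arr 0 a0 ha0)
      have := Nat.cast_sub (R := Int) hge
      push_cast [this]
      ring

-- the doubling phase: an odd positive value reaches a fixed point in at most k steps
theorem conv_double : ∀ (k : Nat) (a : Int), a % 2 = 1 → 1 ≤ a → 51 ≤ 2 ^ k * (a + 1) →
    ∃ n ≤ k, Pfix a n := by
  intro k
  induction k with
  | zero =>
    intro a hodd _ hbig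
    refine ⟨0, le_refl 0, ?_⟩
    have h50 : 50 ≤ a := by omega
    unfold Pfix
    simp only [Function.iterate_zero, id]
    have h1 : ¬(a ≥ 50 ∧ a % 2 = 0) := by omega
    have h2 : ¬(a < 50 ∧ a % 2 = 1) := by omega
    exact stepA_fixed h1 h2
  | succ k ih =>
    intro a hodd hpos hbig
    by_cases h50 : 50 ≤ a
    · refine ⟨0, Nat.zero_le _, ?_⟩
      unfold Pfix
      simp only [Function.iterate_zero, id]
      have h1 : ¬(a ≥ 50 ∧ a % 2 = 0) := by omega
      have h2 : ¬(a < 50 ∧ a % 2 = 1) := by omega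
      exact stepA_fixed h1 h2
    · have hstep : solutionStepA a = a * 2 + 1 := by
        unfold solutionStepA
        have h1 : ¬(a ≥ 50 ∧ a % 2 = 0) := by omega
        have h2 : a < 50 ∧ a % 2 = 1 := by omega
        rw [if_neg h1, if_pos h2]
      have hbig' : 51 ≤ 2 ^ k * ((a * 2 + 1) + 1) := by
        have : (2 : Int) ^ (k + 1) * (a + 1) = 2 ^ k * ((a * 2 + 1) + 1) := by ring
        omega
      obtain ⟨n, hn, hp⟩ := ih (a * 2 + 1) (by omega) (by omega) hbig'
      refine ⟨n + 1, by omega, ?_⟩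
      rw [← hstep] at hp
      exact Pfix_shift' hp
-- (`omega` above handles the `a % 2` facts since the modulus is the literal 2)

-- positive values converge within k + 5 steps when a ≤ 50·2^k
theorem conv_pos : ∀ (k : Nat) (a : Int), 1 ≤ a → a ≤ 50 * 2 ^ k → ∃ n ≤ k + 5, Pfix a n := by
  intro k
  induction k with
  | zero =>
    intro a hpos hle
    simp only [pow_zero, mul_one] at hle
    by_cases h50 : a = 50
    · refine ⟨2, by omega, ?_⟩
      subst h50
      unfold Pfix
      decide
    · by_cases hodd : a % 2 = 1
      · obtain ⟨n, hn, hp⟩ := conv_double 5 a hodd hpos (by omega)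
        exact ⟨n, by omega, hp⟩
      · refine ⟨0, Nat.zero_le _, ?_⟩
        unfold Pfix
        simp only [Function.iterate_zero, id]
        have h1 : ¬(a ≥ 50 ∧ a % 2 = 0) := by omega
        have h2 : ¬(a < 50 ∧ a % 2 = 1) := by omega
        exact stepA_fixed h1 h2
  | succ k ih =>
    intro a hpos hle
    by_cases hsm : a ≤ 50 * 2 ^ k
    · obtain ⟨n, hn, hp⟩ := ih a hpos hsm
      exact ⟨n, by omega, hp⟩
    · have hpow : (1 : Int) ≤ 2 ^ k := one_le_pow₀ (by omega)
      have h50 : 50 ≤ a := by nlinarith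
      by_cases hodd : a % 2 = 1
      · refine ⟨0, Nat.zero_le _, ?_⟩
        unfold Pfix
        simp only [Function.iterate_zero, id]
        have h1 : ¬(a ≥ 50 ∧ a % 2 = 0) := by omega
        have h2 : ¬(a < 50 ∧ a % 2 = 1) := by omega
        exact stepA_fixed h1 h2
      · have hstep : solutionStepA a = a / 2 := by
          unfold solutionStepA
          have h1 : a ≥ 50 ∧ a % 2 = 0 := by omega
          rw [if_pos h1]
        have hle' : a ≤ 50 * 2 ^ (k + 1) := hle
        have hpow' : (50 : Int) * 2 ^ (k + 1) = 2 * (50 * 2 ^ k) := by ring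
        obtain ⟨n, hn, hp⟩ := ih (a / 2) (by omega) (by omega)
        refine ⟨n + 1, by omega, ?_⟩
        rw [← hstep] at hp
        exact Pfix_shift' hp

-- every admitted element converges within 31 steps
theorem conv_all {a : Int} (hgood : a % 2 = 1 → -1 ≤ a)
    (hdom : -2147483648 ≤ a ∧ a ≤ 2147483648) : Conv a := by
  by_cases hpos : 1 ≤ a
  · have hle : a ≤ 50 * 2 ^ 26 := by
      have : (50 : Int) * 2 ^ 26 = 3355443200 := by norm_num
      omega
    obtain ⟨n, hn, hp⟩ := conv_pos 26 a hpos hle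
    exact ⟨n, by omega, hp⟩
  · by_cases hodd : a % 2 = 1
    · have ha : a = -1 := by have := hgood hodd; omega
      subst ha
      exact ⟨0, by omega, by unfold Pfix; decide⟩
    · refine ⟨0, by omega, ?_⟩
      unfold Pfix
      simp only [Function.iterate_zero, id]
      have h1 : ¬(a ≥ 50 ∧ a % 2 = 0) := by omega
      have h2 : ¬(a < 50 ∧ a % 2 = 1) := by omega
      exact stepA_fixed h1 h2

-- ===== VERDICT (by name: the statement is the Claim_ definition above) =====
theorem solution_spec : Claim_equal_solution := by
  intro arr hdom hpre
  unfold Spec_solution solution solution_alt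
  have hconv : ∀ a ∈ arr, Conv a ∧ Ncount a < 64 := by
    intro a ha
    have hd : pvDomInt a = true := (List.all_eq_true.mp hdom) a ha
    have hd' : -2147483648 ≤ a ∧ a ≤ 2147483648 := by
      simpa [pvDomInt] using hd
    obtain ⟨n, hn, hp⟩ := conv_all (hpre a ha) hd'
    exact ⟨⟨n, hn, hp⟩, by have := Ncount_le hp; omega⟩
  rw [loopA_eq 64 arr 0 hconv]
  have hmap : arr.map (altSteps 64) = arr.map Ncount := by
    apply List.map_congr_left
    intro a _
    exact altSteps_eq_Cn 64 a
  rw [hmap, foldl_max_eq_foldr Ncount arr 0]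
  simp
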